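-- pv_equiv track=rewrite | github.com/spinetru/TEST-CASE | hammerdecoder_v2.py | check_bit_correct
-- ===== SOURCE A (Python) =====
-- def check_bit_correct(segm, checkbit, maskcheck):
-- 	y= segm & checkbit
-- 	x= segm & maskcheck
-- 	i=0
-- 	while (x>0):
-- 		if (x%2 >0):
-- 			 i=i+1
-- 		x=x>>1
-- 	if (0==i%2) :
-- 		return 1
-- 	else:
-- 		return 0
-- ===== SOURCE B (Python) =====
-- def check_bit_correct(segm, checkbit, maskcheck):
--     v = segm & maskcheck
--     if v <= 0:
--         return 1
--     parity = 0
--     while v > 0: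
--         v &= v - 1
--         parity ^= 1
--     return 1 - parity
-- ===== Notes on version B (the rewrite author's own statement) =====
-- stated objective: idiomatic
-- what changed: Replaces the per-bit-position loop (shift right, test x%2) with Kernighan's clear-lowest-set-bit loop (v &= v-1) toggling a parity flag, iterating once per set bit instead of once per bit position.
import Mathlib
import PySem

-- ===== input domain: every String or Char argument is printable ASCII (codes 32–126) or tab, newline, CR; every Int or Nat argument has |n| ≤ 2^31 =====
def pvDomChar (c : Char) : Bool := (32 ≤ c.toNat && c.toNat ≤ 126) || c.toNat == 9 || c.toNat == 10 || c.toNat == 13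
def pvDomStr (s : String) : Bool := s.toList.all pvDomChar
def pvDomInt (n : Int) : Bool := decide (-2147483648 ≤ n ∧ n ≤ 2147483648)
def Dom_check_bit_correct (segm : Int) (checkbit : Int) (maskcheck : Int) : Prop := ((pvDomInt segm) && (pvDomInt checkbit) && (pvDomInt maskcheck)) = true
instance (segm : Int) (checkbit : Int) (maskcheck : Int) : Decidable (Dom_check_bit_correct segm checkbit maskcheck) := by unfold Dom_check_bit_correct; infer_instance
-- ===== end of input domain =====

-- B replaces A's per-bit-position loop (shift/test x%2) with Kernighan's clear-lowest-set-bit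
-- loop toggling a parity flag; objective: idiomatic.

-- ===== PORT A =====
-- termination helper for A's while loop: a positive x strictly shrinks under x >> 1
theorem pvShiftLt (x : Int) (h : 0 < x) : (x >>> (1 : Nat)).toNat < x.toNat := by
  obtain ⟨n, rfl⟩ : ∃ n : Nat, x = (n : Int) := ⟨x.toNat, (Int.toNat_of_nonneg h.le).symm⟩
  have hc : ((n : Int) >>> (1 : Nat)) = ((n >>> 1 : Nat) : Int) := by
    exact_mod_cast (Int.natCast_shiftRight n 1).symm
  rw [hc]
  simp only [Int.toNat_natCast, Nat.shiftRight_one]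
  omega

-- while (x>0): if (x%2>0): i=i+1; x = x>>1
def pvLoopA (x : Int) (i : Int) : Int :=
  if h : 0 < x then
    pvLoopA (x >>> (1 : Nat)) (if 0 < PySem.Int.mod x 2 then i + 1 else i)
  else i
termination_by x.toNat
decreasing_by exact pvShiftLt x h

def check_bit_correct (segm : Int) (checkbit : Int) (maskcheck : Int) : Int :=
  let _y := PySem.Int.band segm checkbit
  let x := PySem.Int.band segm maskcheck
  let i := pvLoopA x 0
  if 0 = PySem.Int.mod i 2 then 1 else 0

-- ===== PORT B =====
-- termination helper for B's while loop: a positive v strictly shrinks under v &= v-1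
theorem pvClearLt (v : Int) (h : 0 < v) : (PySem.Int.band v (v - 1)).toNat < v.toNat := by
  obtain ⟨n, rfl⟩ : ∃ n : Nat, v = (n : Int) := ⟨v.toNat, (Int.toNat_of_nonneg h.le).symm⟩
  have hn : 0 < n := by exact_mod_cast h
  have h1 : (n : Int) - 1 = ((n - 1 : Nat) : Int) := by omega
  rw [h1, PySem.Int.band_natCast]
  have : n &&& (n - 1) ≤ n - 1 := Nat.and_le_right
  simp only [Int.toNat_natCast]
  omega

-- while v > 0: v &= v - 1; parity ^= 1
def pvLoopB (v : Int) (parity : Int) : Int :=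
  if h : 0 < v then
    pvLoopB (PySem.Int.band v (v - 1)) (PySem.Int.bxor parity 1)
  else parity
termination_by v.toNat
decreasing_by exact pvClearLt v h

def check_bit_correct_alt (segm : Int) (checkbit : Int) (maskcheck : Int) : Int :=
  let v := PySem.Int.band segm maskcheck
  if v ≤ 0 then 1
  else 1 - pvLoopB v 0

-- ===== PRECONDITION & SPEC =====
def Spec_check_bit_correct (segm : Int) (checkbit : Int) (maskcheck : Int) (out : Int) : Prop := out = check_bit_correct_alt segm checkbit maskcheck
instance (segm : Int) (checkbit : Int) (maskcheck : Int) (out : Int) : Decidable (Spec_check_bit_correct segm checkbit maskcheck out) := by unfold Spec_check_bit_correct; infer_instance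

-- ===== CLAIM (what is proved, stated in full; the proofs are below) =====
def Claim_equal_check_bit_correct : Prop := ∀ (segm : Int) (checkbit : Int) (maskcheck : Int), Dom_check_bit_correct segm checkbit maskcheck → Spec_check_bit_correct segm checkbit maskcheck (check_bit_correct segm checkbit maskcheck)

-- ===== LEMMAS AND PROOFS =====

-- popcount of a Nat, the common reference for both loops
def pvPC (n : Nat) : Nat :=
  if n = 0 then 0 else pvPC (n / 2) + n % 2
termination_by n
decreasing_by omega

theorem pvPC_zero : pvPC 0 = 0 := by unfold pvPC; rfl

theorem pvPC_pos (n : Nat) : 0 < n → 0 < pvPC n := by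
  induction n using Nat.strong_induction_on with
  | _ n ih =>
    intro h
    rw [pvPC]
    simp only [if_neg (by omega : ¬ n = 0)]
    rcases Nat.mod_two_eq_zero_or_one n with h2 | h2
    · have := ih (n / 2) (by omega) (by omega)
      omega
    · omega

theorem pvPC_even (m : Nat) : pvPC (2 * m) = pvPC m := by
  rcases Nat.eq_zero_or_pos m with rfl | hm
  · rfl
  · rw [pvPC]
    simp only [if_neg (by omega : ¬ 2 * m = 0)]
    have h1 : 2 * m / 2 = m := by omega
    have h2 : 2 * m % 2 = 0 := by omega
    rw [h1, h2]
    omega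

theorem pvPC_odd (m : Nat) : pvPC (2 * m + 1) = pvPC m + 1 := by
  rw [pvPC]
  simp only [if_neg (by omega : ¬ 2 * m + 1 = 0)]
  have h1 : (2 * m + 1) / 2 = m := by omega
  have h2 : (2 * m + 1) % 2 = 1 := by omega
  rw [h1, h2]

-- (2a) &&& (2b+1) = 2 (a &&& b), by testBit extensionality
theorem pvLandEvenOdd (a b : Nat) : (2 * a) &&& (2 * b + 1) = 2 * (a &&& b) := by
  apply Nat.eq_of_testBit_eq
  intro i
  cases i with
  | zero =>
    simp [Nat.testBit_and, Nat.testBit_zero, Nat.mul_mod_right]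
  | succ j =>
    have h1 : 2 * a / 2 = a := by omega
    have h2 : (2 * b + 1) / 2 = b := by omega
    have h3 : 2 * (a &&& b) / 2 = a &&& b := by omega
    simp only [Nat.testBit_add_one, Nat.and_div_two, h1, h2, h3]

-- clearing the lowest set bit removes exactly one 1-bit
theorem pvPC_clear (n : Nat) : 0 < n → pvPC (n &&& (n - 1)) = pvPC n - 1 := by
  induction n using Nat.strong_induction_on with
  | _ n ih =>
    intro h
    rcases Nat.mod_two_eq_zero_or_one n with h2 | h2
    · -- n even, n > 0: n = 2m with m > 0, n-1 = 2(m-1)+1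
      obtain ⟨m, rfl⟩ : ∃ m, n = 2 * m := ⟨n / 2, by omega⟩
      have hm : 0 < m := by omega
      have h1 : 2 * m - 1 = 2 * (m - 1) + 1 := by omega
      rw [h1, pvLandEvenOdd, pvPC_even, pvPC_even]
      exact ih m (by omega) hm
    · -- n odd: n = 2m+1, n-1 = 2m, and (2m+1) &&& 2m = 2m
      obtain ⟨m, rfl⟩ : ∃ m, n = 2 * m + 1 := ⟨n / 2, by omega⟩
      have h1 : 2 * m + 1 - 1 = 2 * m := by omega
      have h2 : (2 * m + 1) &&& (2 * m) = 2 * m := by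
        rw [Nat.and_comm, pvLandEvenOdd, Nat.and_self]
      rw [h1, h2, pvPC_even, pvPC_odd]
      omega

theorem pvModTwoCast (k : Nat) : PySem.Int.mod (k : Int) 2 = ((k % 2 : Nat) : Int) := by
  exact_mod_cast PySem.Int.mod_natCast k 2

-- A's loop counts the set bits of x (for x = ↑n)
theorem pvLoopA_eq (n : Nat) : ∀ i : Int, pvLoopA (n : Int) i = i + (pvPC n : Int) := by
  induction n using Nat.strong_induction_on with
  | _ n ih =>
    intro i
    rcases Nat.eq_zero_or_pos n with rfl | hn
    · rw [pvLoopA]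
      norm_num [pvPC_zero]
    · rw [pvLoopA]
      have hpos : (0 : Int) < (n : Int) := by exact_mod_cast hn
      rw [dif_pos hpos]
      have hsh : ((n : Int) >>> (1 : Nat)) = ((n / 2 : Nat) : Int) := by
        have := (Int.natCast_shiftRight n 1).symm
        simpa [Nat.shiftRight_one] using this
      rw [hsh, pvModTwoCast, ih (n / 2) (by omega)]
      have hpc : pvPC n = pvPC (n / 2) + n % 2 := by
        rw [pvPC, if_neg (by omega : ¬ n = 0)]
      rw [hpc]
      rcases Nat.mod_two_eq_zero_or_one n with h2 | h2 <;>
        rw [h2] <;> norm_num <;> push_cast <;> ring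

-- B's loop xors in the parity of the popcount of v (for v = ↑n); parity stays in {0,1}
theorem pvLoopB_eq (n : Nat) : ∀ p : Int, (p = 0 ∨ p = 1) → pvLoopB (n : Int) p = PySem.Int.bxor p ((pvPC n % 2 : Nat) : Int) := by
  induction n using Nat.strong_induction_on with
  | _ n ih =>
    intro p hp
    rcases Nat.eq_zero_or_pos n with rfl | hn
    · rw [pvLoopB]
      norm_num [pvPC_zero, PySem.Int.bxor_zero]
    · rw [pvLoopB]
      have hpos : (0 : Int) < (n : Int) := by exact_mod_cast hn
      rw [dif_pos hpos]
      have h1 : (n : Int) - 1 = ((n - 1 : Nat) : Int) := by omega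
      have hlt : n &&& (n - 1) < n := by
        have := Nat.and_le_right (n := n) (m := n - 1); omega
      have hp' : PySem.Int.bxor p 1 = 0 ∨ PySem.Int.bxor p 1 = 1 := by
        rcases hp with rfl | rfl
        · right; decide
        · left; decide
      rw [h1, PySem.Int.band_natCast, ih (n &&& (n - 1)) hlt (PySem.Int.bxor p 1) hp']
      rw [pvPC_clear n hn]
      have hk : 0 < pvPC n := pvPC_pos n hn
      rcases Nat.mod_two_eq_zero_or_one (pvPC n) with h2 | h2
      · have h3 : (pvPC n - 1) % 2 = 1 := by omega
        rw [h2, h3]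
        rcases hp with rfl | rfl <;> decide
      · have h3 : (pvPC n - 1) % 2 = 0 := by omega
        rw [h2, h3]
        rcases hp with rfl | rfl <;> decide

theorem pvLoopA_nonpos (x i : Int) (h : ¬ 0 < x) : pvLoopA x i = i := by
  rw [pvLoopA, dif_neg h]

theorem pvBxorZeroLeft (a : Int) : PySem.Int.bxor 0 a = a := by
  rw [PySem.Int.bxor_comm, PySem.Int.bxor_zero]

-- ===== VERDICT (by name: the statement is the Claim_ definition above) =====
theorem check_bit_correct_spec : Claim_equal_check_bit_correct := by
  intro segm checkbit maskcheck _
  unfold Spec_check_bit_correct check_bit_correct check_bit_correct_alt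
  dsimp only
  generalize PySem.Int.band segm maskcheck = x
  by_cases hpos : 0 < x
  · obtain ⟨n, hn⟩ : ∃ n : Nat, x = (n : Int) := ⟨x.toNat, (Int.toNat_of_nonneg hpos.le).symm⟩
    have hn0 : 0 < n := by rw [hn] at hpos; exact_mod_cast hpos
    subst hn
    rw [pvLoopA_eq n 0, pvLoopB_eq n 0 (Or.inl rfl), pvBxorZeroLeft]
    rw [if_neg (by push_cast; omega : ¬ ((n : Int)) ≤ 0)]
    have hi : (0 : Int) + (pvPC n : Int) = ((pvPC n : Nat) : Int) := by ring
    rw [hi, pvModTwoCast]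
    rcases Nat.mod_two_eq_zero_or_one (pvPC n) with h2 | h2 <;> rw [h2] <;> norm_num
  · rw [pvLoopA_nonpos x 0 hpos]
    rw [if_pos (by omega : x ≤ 0)]
    have hm0 : PySem.Int.mod 0 2 = 0 := by decide
    rw [hm0]
    norm_num
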